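-- pv_equiv track=rewrite | github.com/mauvedeity/adventofcode | 2022/day03/day03.py | groupscan
-- ===== SOURCE A (Python) =====
-- ALLCHRS = 'abcdefghijklmnopqrstuvwxyzABCDEFGHIJKLMNOPQRSTUVWXYZ'
--
-- def groupscan(pl1, pl2, pl3):
--     rv = ''
--     for chidx in ALLCHRS:
--         l1 = chidx in pl1
--         if ((chidx in pl1) and (chidx in pl2) and (chidx in pl3)):
--             rv = chidx
--             break
--     return(rv)
-- ===== SOURCE B (Python) =====
-- ALLCHRS = 'abcdefghijklmnopqrstuvwxyzABCDEFGHIJKLMNOPQRSTUVWXYZ'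
--
-- def groupscan(pl1, pl2, pl3):
--     common = set(pl1) & set(pl2) & set(pl3) & set(ALLCHRS)
--     if not common:
--         return ''
--     return min(common, key=ALLCHRS.index)
-- ===== Notes on version B (the rewrite author's own statement) =====
-- stated objective: alternative
-- what changed: B computes the three-way set intersection of the strings (restricted to set(ALLCHRS)) once and returns the element with the minimum ALLCHRS index (or '' if the intersection is empty), instead of A's linear scan of the 52-char alphabet with three substring-membership tests per char and a break.
import Mathlib
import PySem

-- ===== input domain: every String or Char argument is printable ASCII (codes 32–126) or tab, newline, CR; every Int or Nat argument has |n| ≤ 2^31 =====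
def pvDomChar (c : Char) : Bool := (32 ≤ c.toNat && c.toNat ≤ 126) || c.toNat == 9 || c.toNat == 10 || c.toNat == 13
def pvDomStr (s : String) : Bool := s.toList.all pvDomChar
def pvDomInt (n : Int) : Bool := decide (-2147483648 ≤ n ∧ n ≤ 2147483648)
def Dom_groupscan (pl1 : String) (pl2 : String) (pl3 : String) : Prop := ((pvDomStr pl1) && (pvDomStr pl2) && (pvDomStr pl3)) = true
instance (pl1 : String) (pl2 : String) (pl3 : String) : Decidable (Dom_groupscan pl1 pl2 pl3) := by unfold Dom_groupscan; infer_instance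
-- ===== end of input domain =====

-- B builds the three-way set intersection (restricted to the alphabet) once and selects the minimum by ALLCHRS index, instead of A's scan of the 52-char alphabet with three membership tests per char (objective: alternative).

-- ===== PORT A =====
def ALLCHRS : List Char := "abcdefghijklmnopqrstuvwxyzABCDEFGHIJKLMNOPQRSTUVWXYZ".toList

-- 'for chidx in ALLCHRS: … break' as structural recursion over the alphabet;
-- 'chidx in pl1' is the 1-char-substring test PySem.Chars.isIn [c] pl1 (exact)
def groupscanGo (p1 : List Char) (p2 : List Char) (p3 : List Char) : List Char → String
  | [] => ""                                  -- rv = '' falls through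
  | c :: rest =>
    -- 'l1 = chidx in pl1' is a dead local assignment in A; kept as a discarded let
    let _l1 := PySem.Chars.isIn [c] p1
    if PySem.Chars.isIn [c] p1 && PySem.Chars.isIn [c] p2 && PySem.Chars.isIn [c] p3 then
      String.ofList [c]                           -- rv = chidx; break
    else groupscanGo p1 p2 p3 rest

def groupscan (pl1 : String) (pl2 : String) (pl3 : String) : String :=
  groupscanGo pl1.toList pl2.toList pl3.toList ALLCHRS

-- ===== PORT B =====
-- common = set(pl1) & set(pl2) & set(pl3) & set(ALLCHRS); '' if empty, else min(common, key=ALLCHRS.index).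
-- ALLCHRS.index is ported as PySem.Chars.find ALLCHRS [c]: exact wherever .index returns
-- (the key is only ever applied to members of ALLCHRS, where find = index).
def groupscan_alt (pl1 : String) (pl2 : String) (pl3 : String) : String :=
  let common : PySem.Set Char :=
    PySem.Set.inter
      (PySem.Set.inter
        (PySem.Set.inter (PySem.Set.ofList pl1.toList) (PySem.Set.ofList pl2.toList))
        (PySem.Set.ofList pl3.toList))
      (PySem.Set.ofList ALLCHRS)
  match PySem.List.min? common (fun c => PySem.Chars.find ALLCHRS [c]) with
  | none => ""
  | some c => String.ofList [c]

-- ===== PRECONDITION & SPEC =====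
def Spec_groupscan (pl1 : String) (pl2 : String) (pl3 : String) (out : String) : Prop := out = groupscan_alt pl1 pl2 pl3
instance (pl1 : String) (pl2 : String) (pl3 : String) (out : String) : Decidable (Spec_groupscan pl1 pl2 pl3 out) := by unfold Spec_groupscan; infer_instance

-- ===== CLAIM (what is proved, stated in full; the proofs are below) =====
def Claim_equal_groupscan : Prop := ∀ (pl1 : String) (pl2 : String) (pl3 : String), Dom_groupscan pl1 pl2 pl3 → Spec_groupscan pl1 pl2 pl3 (groupscan pl1 pl2 pl3)

-- ===== LEMMAS AND PROOFS =====

-- the key of B (position in ALLCHRS) is strictly increasing along ALLCHRS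
set_option maxHeartbeats 1000000 in
lemma allchrs_key_mono :
    ALLCHRS.Pairwise (fun a b => PySem.Chars.find ALLCHRS [a] < PySem.Chars.find ALLCHRS [b]) := by
  decide

-- 'c in l' for a single char c is list membership
lemma isIn_singleton_iff (c : Char) (l : List Char) :
    PySem.Chars.isIn [c] l = true ↔ c ∈ l := by
  rw [PySem.Chars.isIn_iff_infix, List.singleton_infix_iff]

-- A's loop is find? over the alphabet
lemma groupscanGo_eq_find? (p1 p2 p3 : List Char) (L : List Char) :
    groupscanGo p1 p2 p3 L =
      match L.find? (fun c => PySem.Chars.isIn [c] p1 && PySem.Chars.isIn [c] p2 && PySem.Chars.isIn [c] p3) with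
      | none => ""
      | some c => String.ofList [c] := by
  induction L with
  | nil => rfl
  | cons c rest ih =>
    simp only [groupscanGo, List.find?]
    by_cases h : (PySem.Chars.isIn [c] p1 && PySem.Chars.isIn [c] p2 && PySem.Chars.isIn [c] p3) = true
    · simp [h]
    · simp only [Bool.not_eq_true] at h
      simp [h, ih]

-- the first element of L satisfying q has the least key among all satisfying members,
-- for any key strictly increasing along L
lemma find?_key_le {q : Char → Bool} {key : Char → Int} :
    ∀ {L : List Char}, L.Pairwise (fun a b => key a < key b) →
      ∀ {c : Char}, L.find? q = some c → ∀ m ∈ L, q m = true → key c ≤ key m := by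
  intro L
  induction L with
  | nil => intro _ c h; simp [List.find?] at h
  | cons a t ih =>
    intro hp c hfind m hm hq
    rw [List.pairwise_cons] at hp
    rw [List.find?_cons] at hfind
    by_cases ha : q a = true
    · simp [ha] at hfind
      subst hfind
      rcases List.mem_cons.mp hm with rfl | hmt
      · exact le_refl _
      · exact le_of_lt (hp.1 m hmt)
    · rw [Bool.not_eq_true] at ha; simp [ha] at hfind
      rcases List.mem_cons.mp hm with rfl | hmt
      · simp [hq] at ha
      · exact ih hp.2 hfind m hmt hq

-- a strictly increasing key is injective on the list's members
lemma key_inj_of_pairwise {key : Char → Int} :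
    ∀ {L : List Char}, L.Pairwise (fun a b => key a < key b) →
      ∀ m ∈ L, ∀ c ∈ L, key m = key c → m = c := by
  intro L
  induction L with
  | nil => intro _ m hm; simp at hm
  | cons a t ih =>
    intro hp m hm c hc heq
    rw [List.pairwise_cons] at hp
    rcases List.mem_cons.mp hm with rfl | hmt <;> rcases List.mem_cons.mp hc with rfl | hct
    · rfl
    · exact absurd heq (ne_of_lt (hp.1 c hct))
    · exact absurd heq.symm (ne_of_lt (hp.1 m hmt))
    · exact ih hp.2 m hmt c hct heq

-- membership in B's intersection set
lemma mem_common (pl1 pl2 pl3 : String) (c : Char) :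
    (c ∈ PySem.Set.inter
        (PySem.Set.inter
          (PySem.Set.inter (PySem.Set.ofList pl1.toList) (PySem.Set.ofList pl2.toList))
          (PySem.Set.ofList pl3.toList))
        (PySem.Set.ofList ALLCHRS)) ↔
      c ∈ ALLCHRS ∧ (PySem.Chars.isIn [c] pl1.toList && PySem.Chars.isIn [c] pl2.toList && PySem.Chars.isIn [c] pl3.toList) = true := by
  simp only [PySem.Set.mem_inter, PySem.Set.mem_ofList, Bool.and_eq_true,
    isIn_singleton_iff]
  tauto

-- ===== VERDICT (by name: the statement is the Claim_ definition above) =====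
theorem groupscan_spec : Claim_equal_groupscan := by
  intro pl1 pl2 pl3 _
  unfold Spec_groupscan groupscan groupscan_alt
  rw [groupscanGo_eq_find?]
  set q : Char → Bool := fun c =>
    PySem.Chars.isIn [c] pl1.toList && PySem.Chars.isIn [c] pl2.toList && PySem.Chars.isIn [c] pl3.toList with hq
  set key : Char → Int := fun c => PySem.Chars.find ALLCHRS [c] with hkey
  set S : PySem.Set Char :=
    PySem.Set.inter
      (PySem.Set.inter
        (PySem.Set.inter (PySem.Set.ofList pl1.toList) (PySem.Set.ofList pl2.toList))
        (PySem.Set.ofList pl3.toList))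
      (PySem.Set.ofList ALLCHRS) with hS
  have hmemS : ∀ c, c ∈ S ↔ c ∈ ALLCHRS ∧ q c = true := fun c => mem_common pl1 pl2 pl3 c
  cases hfind : ALLCHRS.find? q with
  | none =>
    have hSnil : S = [] := by
      apply List.eq_nil_iff_forall_not_mem.mpr
      intro c hc
      obtain ⟨hcL, hcq⟩ := (hmemS c).mp hc
      exact absurd hcq (by simpa using List.find?_eq_none.mp hfind c hcL)
    rw [hSnil]
    rfl
  | some c =>
    have hcq : q c = true := List.find?_some hfind
    have hcL : c ∈ ALLCHRS := List.mem_of_find?_eq_some hfind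
    have hcS : c ∈ S := (hmemS c).mpr ⟨hcL, hcq⟩
    cases hmin : PySem.List.min? S key with
    | none =>
      rw [PySem.List.min?_eq_none_iff] at hmin
      rw [hmin] at hcS
      simp at hcS
    | some m =>
      have hmS : m ∈ S := PySem.List.min?_mem hmin
      obtain ⟨hmL, hmq⟩ := (hmemS m).mp hmS
      have h1 : key c ≤ key m := find?_key_le allchrs_key_mono hfind m hmL hmq
      have h2 : key m ≤ key c := PySem.List.min?_isMin hmin c hcS
      have hmc : m = c := key_inj_of_pairwise allchrs_key_mono m hmL c hcL (le_antisymm h2 h1)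
      show String.ofList [c] = match PySem.List.min? S key with | none => "" | some c => String.ofList [c]
      rw [hmin, hmc]
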